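-- pv_equiv track=rewrite | github.com/CiaoHe/semantic | main.py | lc_suffix
-- ===== SOURCE A (Python) =====
-- def lc_suffix(sen1, sen2):
--     sen1 = sen1.split()
--     sen2 = sen2.split()
--     len1 = len(sen1)
--     len2 = len(sen2)
--     co = 0
--     for i in range(len1 if len1 < len2 else len2):
--         if sen1[len1-1-i] == sen2[len2-1-i]:
--             co += 1
--         else:
--             break
--     return co
-- ===== SOURCE B (Python) =====
-- def lc_suffix(sen1, sen2):
--     w1, w2 = sen1.split(), sen2.split()
--     lo, hi = 0, min(len(w1), len(w2))
--     # binary search the largest k with the last k words equal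
--     # (the predicate is monotone: if the last k words match, so do the last k-1)
--     while lo < hi:
--         mid = (lo + hi + 1) // 2
--         if w1[len(w1) - mid:] == w2[len(w2) - mid:]:
--             lo = mid
--         else:
--             hi = mid - 1
--     return lo
-- ===== Notes on version B (the rewrite author's own statement) =====
-- stated objective: alternative
-- what changed: Replaces A's linear back-to-front counting loop with break by a binary search over the candidate suffix length k, deciding each probe with one whole-slice comparison w1[len(w1)-k:] == w2[len(w2)-k:] (the predicate 'last k words equal' is downward monotone, so the largest true k is exactly A's count).
import Mathlib
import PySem

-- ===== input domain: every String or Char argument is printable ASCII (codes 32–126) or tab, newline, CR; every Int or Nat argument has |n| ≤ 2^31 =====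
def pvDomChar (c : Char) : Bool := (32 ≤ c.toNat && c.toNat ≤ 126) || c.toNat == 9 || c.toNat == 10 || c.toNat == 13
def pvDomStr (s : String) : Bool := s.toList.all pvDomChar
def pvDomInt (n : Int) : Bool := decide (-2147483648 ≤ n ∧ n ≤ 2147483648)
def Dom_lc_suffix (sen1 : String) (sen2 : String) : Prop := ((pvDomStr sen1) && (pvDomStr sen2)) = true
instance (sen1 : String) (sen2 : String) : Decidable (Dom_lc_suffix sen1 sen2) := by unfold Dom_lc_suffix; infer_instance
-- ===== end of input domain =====

-- B replaces A's linear mismatch-counting loop by a binary search for the largest k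
-- with the last k words equal (slice comparison); alternative algorithm, same result.

-- ===== PORT A =====
-- the 'for i in range(...)' loop with its break, as recursion over the range list
def lc_suffix_loop (s1 s2 : List String) (len1 len2 : Int) : List Int → Int → Int
  | [], co => co
  | i :: rest, co =>
    if PySem.List.pyGet? s1 (len1 - 1 - i) = PySem.List.pyGet? s2 (len2 - 1 - i) then
      lc_suffix_loop s1 s2 len1 len2 rest (co + 1)
    else co

def lc_suffix (sen1 : String) (sen2 : String) : Int :=
  let s1 := PySem.Str.split₀ sen1
  let s2 := PySem.Str.split₀ sen2
  let len1 : Int := s1.length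
  let len2 : Int := s2.length
  lc_suffix_loop s1 s2 len1 len2
    (PySem.List.pyRange 0 (if len1 < len2 then len1 else len2) 1) 0

-- ===== PORT B =====
-- Source B's 'while lo < hi' binary-search loop: mid = (lo+hi+1)//2, keep mid if the
-- last mid words agree (compared as Python slices w[len(w)-mid:]), else drop to mid-1
def lc_bsearch (w1 w2 : List String) (lo hi : Int) : Int :=
  if h : lo < hi then
    let mid := PySem.Int.floordiv (lo + hi + 1) 2
    if PySem.List.slice w1 (some ((w1.length : Int) - mid)) none
        = PySem.List.slice w2 (some ((w2.length : Int) - mid)) none then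
      lc_bsearch w1 w2 mid hi
    else
      lc_bsearch w1 w2 lo (mid - 1)
  else lo
termination_by (hi - lo).toNat
decreasing_by
  all_goals
    have hb := PySem.Int.floordiv_two_mid_bounds (lo := lo + 1) (hi := hi) (by omega)
    rw [show lo + 1 + hi = lo + hi + 1 by ring] at hb
    omega

def lc_suffix_alt (sen1 : String) (sen2 : String) : Int :=
  let w1 := PySem.Str.split₀ sen1
  let w2 := PySem.Str.split₀ sen2
  lc_bsearch w1 w2 0 ((min w1.length w2.length : Nat) : Int)

-- ===== PRECONDITION & SPEC =====
def Spec_lc_suffix (sen1 : String) (sen2 : String) (out : Int) : Prop := out = lc_suffix_alt sen1 sen2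
instance (sen1 : String) (sen2 : String) (out : Int) : Decidable (Spec_lc_suffix sen1 sen2 out) := by unfold Spec_lc_suffix; infer_instance

-- ===== CLAIM (what is proved, stated in full; the proofs are below) =====
def Claim_equal_lc_suffix : Prop := ∀ (sen1 : String) (sen2 : String), Dom_lc_suffix sen1 sen2 → Spec_lc_suffix sen1 sen2 (lc_suffix sen1 sen2)

-- ===== LEMMAS AND PROOFS =====

-- proof-only helper: common-prefix length of two lists
def lcp : List String → List String → Nat
  | x :: xs, y :: ys => if x = y then 1 + lcp xs ys else 0
  | _, _ => 0

lemma lcp_nil_left (ys : List String) : lcp [] ys = 0 := by cases ys <;> rfl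

lemma lcp_nil_right (xs : List String) : lcp xs [] = 0 := by cases xs <;> rfl

lemma lcp_le_left (xs ys : List String) : lcp xs ys ≤ xs.length := by
  induction xs generalizing ys with
  | nil => simp [lcp_nil_left]
  | cons x xs ih =>
    cases ys with
    | nil => simp [lcp_nil_right]
    | cons y ys =>
      simp only [lcp, List.length_cons]
      split_ifs
      · have := ih ys; omega
      · omega

lemma lcp_le_right (xs ys : List String) : lcp xs ys ≤ ys.length := by
  induction xs generalizing ys with
  | nil => simp [lcp_nil_left]
  | cons x xs ih =>
    cases ys with
    | nil => simp [lcp_nil_right]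
    | cons y ys =>
      simp only [lcp, List.length_cons]
      split_ifs
      · have := ih ys; omega
      · omega

-- take k of two lists is equal exactly when k is at most the common-prefix length
lemma lcp_take_iff (u v : List String) (k : Nat)
    (hu : k ≤ u.length) (hv : k ≤ v.length) :
    u.take k = v.take k ↔ k ≤ lcp u v := by
  induction u generalizing v k with
  | nil =>
    have : k = 0 := by simpa using hu
    subst this; simp
  | cons a u ih =>
    cases v with
    | nil =>
      have : k = 0 := by simpa using hv
      subst this; simp
    | cons b v =>
      cases k with
      | zero => simp
      | succ k =>
        simp only [List.take_succ_cons, List.cons.injEq, lcp]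
        by_cases h : a = b
        · rw [if_pos h]
          simp only [List.length_cons] at hu hv
          rw [ih v k (by omega) (by omega)]
          constructor
          · rintro ⟨_, hk⟩; omega
          · intro hk; exact ⟨h, by omega⟩
        · rw [if_neg h]
          constructor
          · rintro ⟨hab, _⟩; exact absurd hab h
          · omega

-- A's loop, started at index k, counts the common-prefix length of the reversed lists
-- with k elements dropped.
lemma lc_loop_eq (s1 s2 : List String) (k : Nat) (co : Int)
    (hk : k ≤ min s1.length s2.length) :
    lc_suffix_loop s1 s2 s1.length s2.length
      (PySem.List.pyRange (k : Int) ((min s1.length s2.length : Nat) : Int) 1) co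
    = co + lcp (s1.reverse.drop k) (s2.reverse.drop k) := by
  induction hfuel : min s1.length s2.length - k generalizing k co with
  | zero =>
    rw [PySem.List.pyRange_one_eq_nil (by exact_mod_cast (by omega : min s1.length s2.length ≤ k))]
    rcases le_total s1.length s2.length with h | h
    · have : s1.reverse.drop k = [] := by
        apply List.drop_eq_nil_of_le; simp; omega
      rw [this, lcp_nil_left, lc_suffix_loop]; ring
    · have : s2.reverse.drop k = [] := by
        apply List.drop_eq_nil_of_le; simp; omega
      rw [this, lcp_nil_right, lc_suffix_loop]; ring
  | succ n ih =>
    have hk1 : k < min s1.length s2.length := by omega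
    have h1 : k < s1.length := by omega
    have h2 : k < s2.length := by omega
    rw [PySem.List.pyRange_one_cons (by exact_mod_cast hk1)]
    have e1 : PySem.List.pyGet? s1 ((s1.length : Int) - 1 - (k : Int))
        = some (s1[s1.length - 1 - k]'(by omega)) := by
      rw [show (s1.length : Int) - 1 - (k : Int) = ((s1.length - 1 - k : Nat) : Int) by
        omega]
      rw [PySem.List.pyGet?_natCast, List.getElem?_eq_getElem (by omega)]
    have e2 : PySem.List.pyGet? s2 ((s2.length : Int) - 1 - (k : Int))
        = some (s2[s2.length - 1 - k]'(by omega)) := by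
      rw [show (s2.length : Int) - 1 - (k : Int) = ((s2.length - 1 - k : Nat) : Int) by
        omega]
      rw [PySem.List.pyGet?_natCast, List.getElem?_eq_getElem (by omega)]
    have rev1 : s1.reverse.drop k
        = (s1[s1.length - 1 - k]'(by omega)) :: s1.reverse.drop (k + 1) := by
      rw [List.drop_eq_getElem_cons (by simpa using h1)]
      congr 1
      simp [List.getElem_reverse]
    have rev2 : s2.reverse.drop k
        = (s2[s2.length - 1 - k]'(by omega)) :: s2.reverse.drop (k + 1) := by
      rw [List.drop_eq_getElem_cons (by simpa using h2)]
      congr 1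
      simp [List.getElem_reverse]
    rw [lc_suffix_loop, e1, e2]
    by_cases heq : (s1[s1.length - 1 - k]'(by omega)) = (s2[s2.length - 1 - k]'(by omega))
    · rw [if_pos (by rw [heq])]
      rw [show ((k : Int) + 1) = ((k + 1 : Nat) : Int) by push_cast; ring]
      rw [ih (k + 1) (co + 1) (by omega) (by omega)]
      rw [rev1, rev2]
      simp only [lcp, if_pos heq]
      push_cast; ring
    · rw [if_neg (by simpa using heq)]
      rw [rev1, rev2]
      simp only [lcp, if_neg heq]
      push_cast; ring

-- the slice comparison of Source B at a candidate size tests 'candidate ≤ common-suffix length'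
lemma slice_test_iff (w1 w2 : List String) (mid : Int)
    (h0 : 0 < mid) (h1 : mid ≤ (w1.length : Int)) (h2 : mid ≤ (w2.length : Int)) :
    (PySem.List.slice w1 (some ((w1.length : Int) - mid)) none
        = PySem.List.slice w2 (some ((w2.length : Int) - mid)) none)
      ↔ mid.toNat ≤ lcp w1.reverse w2.reverse := by
  rw [PySem.List.slice_from w1 (a := (w1.length : Int) - mid) (by omega),
      PySem.List.slice_from w2 (a := (w2.length : Int) - mid) (by omega)]
  have e1 : ((w1.length : Int) - mid).toNat = w1.length - mid.toNat := by omega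
  have e2 : ((w2.length : Int) - mid).toNat = w2.length - mid.toNat := by omega
  rw [e1, e2]
  have d1 : List.drop (w1.length - mid.toNat) w1 = (w1.reverse.take mid.toNat).reverse := by
    simpa using (List.reverse_take (l := w1.reverse) (i := mid.toNat)).symm
  have d2 : List.drop (w2.length - mid.toNat) w2 = (w2.reverse.take mid.toNat).reverse := by
    simpa using (List.reverse_take (l := w2.reverse) (i := mid.toNat)).symm
  rw [d1, d2, List.reverse_inj]
  exact lcp_take_iff w1.reverse w2.reverse mid.toNat (by simp; omega) (by simp; omega)

-- the binary search converges to the common-prefix length of the reversed lists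
lemma lc_bsearch_eq (w1 w2 : List String) (lo hi : Int)
    (hlo : 0 ≤ lo) (hm1 : lo ≤ (lcp w1.reverse w2.reverse : Int))
    (hm2 : (lcp w1.reverse w2.reverse : Int) ≤ hi)
    (hhi : hi ≤ ((min w1.length w2.length : Nat) : Int)) :
    lc_bsearch w1 w2 lo hi = (lcp w1.reverse w2.reverse : Int) := by
  induction hfuel : (hi - lo).toNat using Nat.strong_induction_on generalizing lo hi with
  | _ n ih =>
  rw [lc_bsearch]
  by_cases h : lo < hi
  · rw [dif_pos h]
    have hmid := PySem.Int.floordiv_two_mid_bounds (lo := lo + 1) (hi := hi) (by omega)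
    rw [show (lo + 1 + hi) = (lo + hi + 1) by ring] at hmid
    set mid := PySem.Int.floordiv (lo + hi + 1) 2 with hmiddef
    have hb1 : lo + 1 ≤ mid := hmid.1
    have hb2 : mid ≤ hi := hmid.2
    have htest := slice_test_iff w1 w2 mid (by omega)
      (by simp at hhi ⊢; omega) (by simp at hhi ⊢; omega)
    by_cases hc : mid.toNat ≤ lcp w1.reverse w2.reverse
    · rw [if_pos (htest.mpr hc)]
      exact ih ((hi - mid).toNat) (by omega) mid hi (by omega) (by omega) hm2 hhi rfl
    · rw [if_neg (fun hh => hc (htest.mp hh))]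
      exact ih ((mid - 1 - lo).toNat) (by omega) lo (mid - 1) hlo hm1 (by omega)
        (by omega) rfl
  · rw [dif_neg h]
    omega

lemma lc_suffix_eq (sen1 sen2 : String) : lc_suffix sen1 sen2 = lc_suffix_alt sen1 sen2 := by
  simp only [lc_suffix, lc_suffix_alt]
  set s1 := PySem.Str.split₀ sen1 with hs1
  set s2 := PySem.Str.split₀ sen2 with hs2
  have hmin : (if (s1.length : Int) < (s2.length : Int) then (s1.length : Int) else (s2.length : Int))
      = ((min s1.length s2.length : Nat) : Int) := by
    split_ifs with h <;> push_cast <;> omega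
  rw [hmin]
  have h1 := lc_loop_eq s1 s2 0 0 (by omega)
  simp only [Nat.cast_zero, List.drop_zero, zero_add] at h1
  rw [h1]
  have hle : lcp s1.reverse s2.reverse ≤ min s1.length s2.length := by
    have a := lcp_le_left s1.reverse s2.reverse
    have b := lcp_le_right s1.reverse s2.reverse
    simp at a b; omega
  rw [lc_bsearch_eq s1 s2 0 ((min s1.length s2.length : Nat) : Int) (by omega)
    (by omega) (by exact_mod_cast hle) (le_refl _)]

-- ===== VERDICT (by name: the statement is the Claim_ definition above) =====
theorem lc_suffix_spec : Claim_equal_lc_suffix := by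
  intro sen1 sen2 _
  exact lc_suffix_eq sen1 sen2
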